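-- pv_equiv track=rewrite | github.com/daverosoff/adventofcode | 2018/02/puzzle.py | has_n
-- ===== SOURCE A (Python) =====
-- def has_n(st, n):
--     freq_map = {}
--     for ch in st:
--         if ch not in freq_map:
--             freq_map[ch] = 1
--         else:
--             freq_map[ch] += 1
--     return any([v == n for v in freq_map.values()])
-- ===== SOURCE B (Python) =====
-- def has_n(st, n):
--     chars = list(st)
--     while chars:
--         rest = [c for c in chars if c != chars[0]]
--         if len(chars) - len(rest) == n:
--             return True
--         chars = rest
--     return False
-- ===== Notes on version B (the rewrite author's own statement) =====
-- stated objective: alternative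
-- what changed: Replaces the frequency-dictionary build plus values scan by recursive partitioning: repeatedly split off one character class (all occurrences of the first remaining character), test whether its size equals n, and continue on the remainder, so no frequency table is ever materialised.
import Mathlib
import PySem

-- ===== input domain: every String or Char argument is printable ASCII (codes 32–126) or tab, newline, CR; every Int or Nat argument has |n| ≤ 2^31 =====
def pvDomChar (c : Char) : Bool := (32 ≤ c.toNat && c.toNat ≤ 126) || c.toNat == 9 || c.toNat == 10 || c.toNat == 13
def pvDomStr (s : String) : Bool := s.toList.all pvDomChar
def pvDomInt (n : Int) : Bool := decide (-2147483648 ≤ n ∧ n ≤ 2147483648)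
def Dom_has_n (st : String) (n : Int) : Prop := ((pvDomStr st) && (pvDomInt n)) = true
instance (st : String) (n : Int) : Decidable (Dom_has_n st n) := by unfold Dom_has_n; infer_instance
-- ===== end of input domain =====

-- B replaces A's frequency dictionary by recursive partitioning: split off one character class at a time and test its size (alternative decomposition, same results).


-- ===== PORT A =====
def has_n (st : String) (n : Int) : Bool :=
  let freq_map : PySem.Dict Char Int :=
    st.toList.foldl (fun d ch =>
      if ¬ d.contains ch then d.insert ch 1
      else d.modify ch 0 (· + 1)) PySem.Dict.empty
  (freq_map.values.map (fun v => v == n)).any id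

-- ===== PORT B =====
-- B's while loop over the shrinking list `chars`, as recursion on the list
def hasNGo (chars : List Char) (n : Int) : Bool :=
  match chars with
  | [] => false
  | ch :: tl =>
      let rest := (ch :: tl).filter (fun c => c ≠ ch)
      if ((((ch :: tl).length : Int) - (rest.length : Int)) == n) then true
      else hasNGo rest n
termination_by chars.length
decreasing_by
  have h1 : ((ch :: tl).filter (fun c => c ≠ ch)) = tl.filter (fun c => c ≠ ch) := by
    simp
  simp only [h1, List.length_cons]
  exact Nat.lt_succ_of_le (List.length_filter_le _ tl)

def has_n_alt (st : String) (n : Int) : Bool :=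
  hasNGo st.toList n

-- ===== PRECONDITION & SPEC =====
def Spec_has_n (st : String) (n : Int) (out : Bool) : Prop := out = has_n_alt st n
instance (st : String) (n : Int) (out : Bool) : Decidable (Spec_has_n st n out) := by unfold Spec_has_n; infer_instance

-- ===== CLAIM =====
def Claim_equal_has_n : Prop := ∀ (st : String) (n : Int), Dom_has_n st n → Spec_has_n st n (has_n st n)

-- ===== LEMMAS AND PROOFS =====

-- A's loop step is the counter step: when ch is absent, modify inserts count 1 anyway
theorem has_n_step_eq (d : PySem.Dict Char Int) (ch : Char) :
    (if ¬ d.contains ch then d.insert ch 1 else d.modify ch 0 (· + 1))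
      = d.modify ch 0 (· + 1) := by
  by_cases h : d.contains ch
  · simp [h]
  · simp [h, PySem.Dict.modify, PySem.Dict.getD_of_not_contains]

-- A's loop builds exactly collections.Counter(st)
theorem has_n_foldl_eq_counter (xs : List Char) :
    xs.foldl (fun d ch =>
      if ¬ d.contains ch then d.insert ch 1
      else d.modify ch 0 (· + 1)) PySem.Dict.empty = PySem.Dict.counter xs := by
  rw [PySem.Dict.counter_eq_foldl]
  have hf : (fun (d : PySem.Dict Char Int) ch =>
      if ¬ d.contains ch then d.insert ch 1 else d.modify ch 0 (· + 1))
      = (fun d ch => d.modify ch 0 (· + 1)) := by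
    funext d ch; exact has_n_step_eq d ch
  rw [hf]

-- A returns true iff some character of st occurs exactly n times
theorem has_n_iff (st : String) (n : Int) :
    has_n st n = true ↔ ∃ c ∈ st.toList, (st.toList.count c : Int) = n := by
  show ((st.toList.foldl _ PySem.Dict.empty).values.map (fun v => v == n)).any id = true ↔ _
  rw [has_n_foldl_eq_counter]
  have hv : (PySem.Dict.counter st.toList).values
      = (PySem.Set.ofList st.toList).map (fun k => (st.toList.count k : Int)) := by
    show ((PySem.Dict.counter st.toList).items.map Prod.snd) = _
    rw [PySem.Dict.items_counter]
    simp [List.map_map, Function.comp]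
  rw [hv]
  simp [List.any_eq_true, PySem.Set.mem_ofList]

-- the size of the split-off class is the count of its character
theorem split_size_count_aux (ch : Char) : ∀ xs : List Char,
    ((xs.length : Int) - ((xs.filter (fun c => c ≠ ch)).length : Int)) = (xs.count ch : Int) := by
  intro xs
  induction xs with
  | nil => simp
  | cons x tl ih =>
      have hle := List.length_filter_le (fun c => decide (c ≠ ch)) tl
      by_cases h : x = ch
      · subst h
        simp only [List.filter_cons, List.count_cons, List.length_cons]
        simp only [ne_eq, not_true_eq_false, decide_false, Bool.false_eq_true, if_false,
          beq_self_eq_true, if_true]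
        simp only [ne_eq] at ih hle
        omega
      · simp only [List.filter_cons, List.count_cons, List.length_cons]
        have hb : (x == ch) = false := by simp [h]
        simp only [ne_eq, h, not_false_eq_true, decide_true, if_true, hb, Bool.false_eq_true,
          if_false, List.length_cons]
        simp only [ne_eq] at ih hle
        omega

theorem split_size_eq_count (ch : Char) (tl : List Char) :
    (((ch :: tl).length : Int) - (((ch :: tl).filter (fun c => c ≠ ch)).length : Int))
      = ((ch :: tl).count ch : Int) :=
  split_size_count_aux ch (ch :: tl)

-- counts of surviving characters are unchanged by the split
theorem count_filter_ne (c ch : Char) (xs : List Char) (hne : c ≠ ch) :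
    (xs.filter (fun x => x ≠ ch)).count c = xs.count c :=
  List.count_filter (by simp [hne])

-- B's loop returns true iff some character occurs exactly n times
theorem hasNGo_iff (n : Int) : ∀ (k : ℕ) (xs : List Char), xs.length ≤ k →
    (hasNGo xs n = true ↔ ∃ c ∈ xs, (xs.count c : Int) = n) := by
  intro k
  induction k with
  | zero =>
      intro xs hlen
      have hnil : xs = [] := List.eq_nil_of_length_eq_zero (Nat.le_zero.mp hlen)
      subst hnil; rw [hasNGo]; simp
  | succ k ih =>
      intro xs hlen
      match xs with
      | [] => rw [hasNGo]; simp
      | ch :: tl =>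
          rw [hasNGo]
          have hrest : ((ch :: tl).filter (fun c => c ≠ ch)) = tl.filter (fun c => c ≠ ch) := by
            simp
          have hlen' : ((ch :: tl).filter (fun c => c ≠ ch)).length ≤ k := by
            rw [hrest]
            have htl : tl.length ≤ k := by simpa using hlen
            exact le_trans (List.length_filter_le _ tl) htl
          have IH := ih _ hlen'
          split_ifs with hsz
          · simp only [true_iff]
            refine ⟨ch, List.mem_cons_self .., ?_⟩
            rw [← split_size_eq_count ch tl]
            exact of_decide_eq_true (by exact_mod_cast hsz)
          · rw [IH]
            have hsz' : ¬ (((ch :: tl).count ch : Int) = n) := by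
              rw [← split_size_eq_count ch tl]
              simpa using hsz
            constructor
            · rintro ⟨c, hc, hcount⟩
              have hcne : c ≠ ch := by
                have hfc := (List.mem_filter.mp hc).2
                intro heq; subst heq; simp at hfc
              refine ⟨c, List.mem_of_mem_filter hc, ?_⟩
              rw [← count_filter_ne c ch (ch :: tl) hcne]; exact hcount
            · rintro ⟨c, hc, hcount⟩
              have hcne : c ≠ ch := by
                rintro rfl
                exact hsz' hcount
              exact ⟨c, List.mem_filter.mpr ⟨hc, by simp [hcne]⟩,
                by rw [count_filter_ne c ch _ hcne]; exact hcount⟩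

theorem has_n_spec_aux (st : String) (n : Int) : has_n st n = has_n_alt st n := by
  have hA := has_n_iff st n
  have hB := hasNGo_iff n st.toList.length st.toList le_rfl
  show has_n st n = hasNGo st.toList n
  rw [Bool.eq_iff_iff, hA, hB]

-- ===== VERDICT =====
theorem has_n_spec : Claim_equal_has_n := by
  intro st n _
  exact has_n_spec_aux st n
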